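-- pv_equiv track=rewrite | github.com/vanderschaarlab/mlforhealthlabpub | app/PIP-COVID19/model/base_model.py | collapse_change_points
-- ===== SOURCE A (Python) =====
-- def collapse_change_points(input_nkbps, offset_duration=14):
--
--     new_nkbps = []
--
--     for k in range(len(input_nkbps)):
--
--         if k==0:
--
--             new_nkbps.append(input_nkbps[k])
--
--         elif input_nkbps[k] - input_nkbps[k-1] >= offset_duration:
--
--             new_nkbps.append(input_nkbps[k])
--
--         else:
--
--             new_nkbps[-1] = input_nkbps[k]
--
--     return new_nkbps
-- ===== SOURCE B (Python) =====
-- def collapse_change_points(input_nkbps, offset_duration=14):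
--     # an element survives iff it ends a run: its successor starts a new run;
--     # the last element always survives
--     kept = [x for x, nxt in zip(input_nkbps, input_nkbps[1:])
--             if nxt - x >= offset_duration]
--     return kept + input_nkbps[-1:]
-- ===== Notes on version B (the rewrite author's own statement) =====
-- stated objective: simpler
-- what changed: B is a stateless pairwise selection: it zips the list with its own tail and keeps each element whose successor is at least offset_duration away, then appends the last element, instead of A's stateful index loop that appends or overwrites the last slot of the result in place.
import Mathlib
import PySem

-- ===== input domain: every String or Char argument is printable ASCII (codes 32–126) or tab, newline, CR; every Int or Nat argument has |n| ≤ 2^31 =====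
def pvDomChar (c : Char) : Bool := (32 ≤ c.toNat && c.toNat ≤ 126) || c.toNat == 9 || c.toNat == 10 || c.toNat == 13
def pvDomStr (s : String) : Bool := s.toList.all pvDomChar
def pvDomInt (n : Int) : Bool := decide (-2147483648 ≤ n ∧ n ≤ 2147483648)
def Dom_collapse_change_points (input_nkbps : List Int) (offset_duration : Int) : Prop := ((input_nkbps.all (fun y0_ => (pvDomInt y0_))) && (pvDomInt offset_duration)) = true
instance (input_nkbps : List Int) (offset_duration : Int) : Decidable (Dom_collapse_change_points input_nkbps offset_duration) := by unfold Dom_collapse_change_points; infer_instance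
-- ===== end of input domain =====

-- B replaces A's stateful index loop (append / overwrite the last result slot) by a stateless
-- pairwise selection: keep each element whose successor is ≥ offset_duration away, plus the
-- last element (objective: simpler).

-- ===== PORT A =====
-- for k in range(len(input_nkbps)): append at k==0 or on a gap, else new_nkbps[-1] = input_nkbps[k]
def collapse_change_points (input_nkbps : List Int) (offset_duration : Int) : List Int :=
  (PySem.List.pyRange 0 input_nkbps.length 1).foldl
    (fun new_nkbps k =>
      if k == 0 then
        new_nkbps ++ [PySem.List.pyGetD input_nkbps k 0]
      else if PySem.List.pyGetD input_nkbps k 0 - PySem.List.pyGetD input_nkbps (k - 1) 0 ≥ offset_duration then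
        new_nkbps ++ [PySem.List.pyGetD input_nkbps k 0]
      else
        PySem.List.pySetD new_nkbps (-1) (PySem.List.pyGetD input_nkbps k 0))
    []

-- ===== PORT B =====
-- kept = [x for x, nxt in zip(input_nkbps, input_nkbps[1:]) if nxt - x >= offset_duration]
-- return kept + input_nkbps[-1:]
def collapse_change_points_alt (input_nkbps : List Int) (offset_duration : Int) : List Int :=
  ((input_nkbps.zip (PySem.List.slice input_nkbps (some 1) none)).filter
      (fun p => decide (p.2 - p.1 ≥ offset_duration))).map Prod.fst
  ++ PySem.List.slice input_nkbps (some (-1)) none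

-- ===== PRECONDITION & SPEC =====
def Spec_collapse_change_points (input_nkbps : List Int) (offset_duration : Int) (out : List Int) : Prop := out = collapse_change_points_alt input_nkbps offset_duration
instance (input_nkbps : List Int) (offset_duration : Int) (out : List Int) : Decidable (Spec_collapse_change_points input_nkbps offset_duration out) := by unfold Spec_collapse_change_points; infer_instance

-- ===== CLAIM (what is proved, stated in full; the proofs are below) =====
def Claim_equal_collapse_change_points : Prop := ∀ (input_nkbps : List Int) (offset_duration : Int), Dom_collapse_change_points input_nkbps offset_duration → Spec_collapse_change_points input_nkbps offset_duration (collapse_change_points input_nkbps offset_duration)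

-- ===== LEMMAS AND PROOFS =====

-- the "kept" part of B, as a function of a list prefix
def keptF (off : Int) (xs : List Int) : List Int :=
  ((xs.zip xs.tail).filter (fun p => decide (p.2 - p.1 ≥ off))).map Prod.fst

-- xs[-1] = v replaces the last element of a nonempty list
theorem pySetD_neg_one_eq {α : Type} (xs : List α) (v : α) (h : xs ≠ []) :
    PySem.List.pySetD xs (-1) v = xs.dropLast ++ [v] := by
  have hl : 1 ≤ xs.length := List.length_pos_iff.mpr h
  simp only [PySem.List.pySetD, PySem.List.pySet?, PySem.List.pyIdx?]
  induction xs using List.reverseRecOn with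
  | nil => simp at hl
  | append_singleton ys z _ => simp [List.set_append]

-- appending one element past b adds (or not) b to the kept part
theorem keptF_concat (off : Int) (ys : List Int) (b a : Int) :
    keptF off (ys ++ [b, a]) =
      keptF off (ys ++ [b]) ++ (if a - b ≥ off then [b] else []) := by
  induction ys with
  | nil =>
    simp only [keptF, List.nil_append, List.tail_cons, List.zip_cons_cons,
      List.zip_nil_right, List.filter_cons, List.filter_nil]
    split_ifs with h <;> simp_all
  | cons y ys ih =>
    cases ys with
    | nil =>
      simp only [keptF, List.cons_append, List.nil_append, List.tail_cons,
        List.zip_cons_cons, List.zip_nil_right, List.filter_cons, List.filter_nil]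
      split_ifs <;> simp_all
    | cons z zs =>
      simp only [keptF, List.cons_append, List.tail_cons, List.zip_cons_cons,
        List.filter_cons] at ih ⊢
      split_ifs <;> simp_all

-- take (k+1) = take k ++ [getD k]
theorem take_succ_getD (xs : List Int) (k : Nat) (h : k < xs.length) :
    xs.take (k + 1) = xs.take k ++ [xs.getD k 0] := by
  rw [List.take_add_one]
  congr 1
  simp [List.getD, List.getElem?_eq_getElem h]

-- invariant of A's loop: after k ≥ 1 steps the result is keptF of the prefix plus its last element
theorem foldA_inv (inp : List Int) (off : Int) :
    ∀ k : Nat, 1 ≤ k → k ≤ inp.length →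
      (PySem.List.pyRange 0 (k : Int) 1).foldl
        (fun new_nkbps j =>
          if j == 0 then
            new_nkbps ++ [PySem.List.pyGetD inp j 0]
          else if PySem.List.pyGetD inp j 0 - PySem.List.pyGetD inp (j - 1) 0 ≥ off then
            new_nkbps ++ [PySem.List.pyGetD inp j 0]
          else
            PySem.List.pySetD new_nkbps (-1) (PySem.List.pyGetD inp j 0))
        []
      = keptF off (inp.take k) ++ [inp.getD (k - 1) 0] := by
  intro k
  induction k with
  | zero => omega
  | succ k ih =>
    intro _ hle
    by_cases hk : k = 0
    · subst hk
      rw [show (((0 : Nat) + 1 : Nat) : Int) = (0 : Int) + 1 by norm_num, PySem.List.pyRange_one_singleton]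
      cases inp with
      | nil => simp at hle
      | cons x t => simp [keptF, PySem.List.pyGetD_zero_cons]
    · have hk1 : 1 ≤ k := by omega
      have hklt : k < inp.length := by omega
      rw [show ((k + 1 : Nat) : Int) = (k : Int) + 1 by push_cast; ring,
        PySem.List.pyRange_one_succ_right (by positivity), List.foldl_append,
        ih hk1 (by omega)]
      simp only [List.foldl_cons, List.foldl_nil]
      have hne : ((k : Int) == 0) = false := by simp; omega
      rw [if_neg (by simp [hne])]
      have hgk : PySem.List.pyGetD inp (k : Int) 0 = inp.getD k 0 := by
        simp [PySem.List.pyGetD_natCast]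
      have hgk1 : PySem.List.pyGetD inp ((k : Int) - 1) 0 = inp.getD (k - 1) 0 := by
        rw [show ((k : Int) - 1) = ((k - 1 : Nat) : Int) by omega]
        simp [PySem.List.pyGetD_natCast]
      -- decompose take (k+1) as take (k-1) ++ [getD (k-1), getD k]
      have htk : inp.take k = inp.take (k - 1) ++ [inp.getD (k - 1) 0] := by
        have := take_succ_getD inp (k - 1) (by omega)
        rwa [show k - 1 + 1 = k by omega] at this
      have htk1 : inp.take (k + 1) = inp.take (k - 1) ++ [inp.getD (k - 1) 0, inp.getD k 0] := by
        rw [take_succ_getD inp k hklt, htk]; simp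
      rw [hgk, hgk1, htk1, keptF_concat, ← htk]
      by_cases hc : inp.getD k 0 - inp.getD (k - 1) 0 ≥ off
      · rw [if_pos hc, if_pos hc]
        simp [show k + 1 - 1 = k by omega]
      · rw [if_neg hc, if_neg hc,
          pySetD_neg_one_eq _ _ (by simp)]
        simp [show k + 1 - 1 = k by omega]

-- the tail slice of B is List.tail; the [-1:] slice of a nonempty list is its last element
theorem drop_len_sub_one (xs : List Int) (h : xs ≠ []) :
    xs.drop (xs.length - 1) = [xs.getD (xs.length - 1) 0] := by
  induction xs using List.reverseRecOn with
  | nil => simp at h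
  | append_singleton ys a _ => simp [List.getD]

-- ===== VERDICT (by name: the statement is the Claim_ definition above) =====
theorem collapse_change_points_spec : Claim_equal_collapse_change_points := by
  intro inp off _
  unfold Spec_collapse_change_points collapse_change_points collapse_change_points_alt
  rcases eq_or_ne inp ([] : List Int) with h | h
  · subst h; simp [PySem.List.slice]
  · have hlen : 1 ≤ inp.length := List.length_pos_iff.mpr h
    rw [show ((inp.length : Int)) = ((inp.length : Nat) : Int) by norm_num,
      foldA_inv inp off inp.length hlen le_rfl, List.take_length,
      PySem.List.slice_from_one, PySem.List.slice_from_neg_one,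
      drop_len_sub_one inp h]
    rfl
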